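-- pv_equiv track=rewrite | github.com/lafleur1/aparentGenomeTesting | deepPastaConfMatrix.py | fillConfMatrix
-- ===== SOURCE A (Python) =====
-- def fillConfMatrix(dictForward, dictRC):
-- 	countTP = 0 #peaks in cluster
-- 	countFP = 0 #peak outside of cluster (in ['Unplaced'])
-- 	countFN = 0 #those w/no peak in the clusters
-- 	for key in dictForward:
-- 		if key != 'Unplaced':
-- 			inCluster = len(dictForward[key])
-- 			if inCluster != 0:
-- 				countTP += inCluster
-- 				#print (key, " contains: ", inCluster)
-- 			else:
-- 				countFN += 1
-- 		else: #unplaced peaks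
-- 			countFP += len(dictForward[key])
-- 	for key in dictRC:
-- 		if key != 'Unplaced':
-- 			inCluster = len(dictRC[key])
-- 			if inCluster != 0:
-- 				countTP += inCluster
-- 				#print (key, " contains: ", inCluster)
-- 			else:
-- 				countFN += 1
-- 		else: #unplaced peaks
-- 			countFP += len(dictRC[key])
-- 	return countTP, countFP, countFN
-- ===== SOURCE B (Python) =====
-- def fillConfMatrix(dictForward, dictRC):
--     # Inclusion-exclusion reformulation: TP is the total number of peaks minus the
--     # unplaced ones (empty clusters contribute 0 anyway), and FN is the number of
--     # empty entries minus the empty 'Unplaced' entries.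
--     items = list(dictForward.items()) + list(dictRC.items())
--     total = sum(len(v) for _, v in items)
--     unplaced = sum(len(v) for k, v in items if k == 'Unplaced')
--     empties = sum(1 for _, v in items if not v)
--     emptyUnplaced = sum(1 for k, v in items if k == 'Unplaced' and not v)
--     return total - unplaced, unplaced, empties - emptyUnplaced
-- ===== Notes on version B (the rewrite author's own statement) =====
-- stated objective: alternative
-- what changed: Replaces A's single three-accumulator branching loop with an inclusion-exclusion computation over the concatenated items: TP = total peak count minus unplaced peak count (no 'len != 0' test at all), FN = number of empty entries minus empty 'Unplaced' entries, FP = unplaced peak count.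
import Mathlib
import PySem

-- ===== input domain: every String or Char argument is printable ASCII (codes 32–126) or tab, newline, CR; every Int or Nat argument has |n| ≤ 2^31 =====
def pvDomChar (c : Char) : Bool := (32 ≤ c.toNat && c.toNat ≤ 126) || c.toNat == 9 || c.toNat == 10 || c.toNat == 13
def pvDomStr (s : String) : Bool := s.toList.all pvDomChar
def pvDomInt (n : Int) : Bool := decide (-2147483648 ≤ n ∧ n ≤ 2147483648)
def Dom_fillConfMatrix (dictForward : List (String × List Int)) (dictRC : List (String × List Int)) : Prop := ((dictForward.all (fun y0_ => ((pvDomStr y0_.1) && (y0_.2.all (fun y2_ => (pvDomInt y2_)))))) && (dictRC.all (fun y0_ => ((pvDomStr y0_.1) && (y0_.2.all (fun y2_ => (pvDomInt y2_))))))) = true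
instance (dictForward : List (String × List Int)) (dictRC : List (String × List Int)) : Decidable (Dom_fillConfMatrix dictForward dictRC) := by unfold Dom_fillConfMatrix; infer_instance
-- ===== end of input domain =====

-- B replaces A's three-accumulator branching loop with an inclusion-exclusion computation:
-- TP = total peaks - unplaced peaks, FN = empty entries - empty 'Unplaced' entries (alternative decomposition).


-- ===== PORT A =====
-- one loop body, used for both dicts: branches in A's order, state (countTP, countFP, countFN)
def fcmStep (st : Int × Int × Int) (kv : String × List Int) : Int × Int × Int :=
  if kv.1 != "Unplaced" then
    let inCluster : Int := kv.2.length
    if inCluster != 0 then (st.1 + inCluster, st.2.1, st.2.2)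
    else (st.1, st.2.1, st.2.2 + 1)
  else (st.1, st.2.1 + (kv.2.length : Int), st.2.2)

def fillConfMatrix (dictForward : List (String × List Int)) (dictRC : List (String × List Int)) : Int × Int × Int :=
  dictRC.foldl fcmStep (dictForward.foldl fcmStep (0, 0, 0))

-- ===== PORT B =====
def fillConfMatrix_alt (dictForward : List (String × List Int)) (dictRC : List (String × List Int)) : Int × Int × Int :=
  let items := dictForward ++ dictRC
  let total : Int := (items.map (fun kv => (kv.2.length : Int))).sum
  let unplaced : Int := ((items.filter (fun kv => kv.1 == "Unplaced")).map (fun kv => (kv.2.length : Int))).sum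
  let empties : Int := ((items.filter (fun kv => kv.2.isEmpty)).map (fun _ => (1 : Int))).sum
  let emptyUnplaced : Int := ((items.filter (fun kv => kv.1 == "Unplaced" && kv.2.isEmpty)).map (fun _ => (1 : Int))).sum
  (total - unplaced, unplaced, empties - emptyUnplaced)

-- ===== PRECONDITION & SPEC =====
def Spec_fillConfMatrix (dictForward : List (String × List Int)) (dictRC : List (String × List Int)) (out : Int × Int × Int) : Prop := out = fillConfMatrix_alt dictForward dictRC
instance (dictForward : List (String × List Int)) (dictRC : List (String × List Int)) (out : Int × Int × Int) : Decidable (Spec_fillConfMatrix dictForward dictRC out) := by unfold Spec_fillConfMatrix; infer_instance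

-- ===== CLAIM (what is proved, stated in full; the proofs are below) =====
def Claim_equal_fillConfMatrix : Prop := ∀ (dictForward : List (String × List Int)) (dictRC : List (String × List Int)), Dom_fillConfMatrix dictForward dictRC → Spec_fillConfMatrix dictForward dictRC (fillConfMatrix dictForward dictRC)

-- ===== LEMMAS AND PROOFS =====
-- B's four aggregations over one list, as functions of the list
def totOf (l : List (String × List Int)) : Int :=
  (l.map (fun kv => (kv.2.length : Int))).sum
def unpOf (l : List (String × List Int)) : Int :=
  ((l.filter (fun kv => kv.1 == "Unplaced")).map (fun kv => (kv.2.length : Int))).sum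
def empOf (l : List (String × List Int)) : Int :=
  ((l.filter (fun kv => kv.2.isEmpty)).map (fun _ => (1 : Int))).sum
def empUnpOf (l : List (String × List Int)) : Int :=
  ((l.filter (fun kv => kv.1 == "Unplaced" && kv.2.isEmpty)).map (fun _ => (1 : Int))).sum

theorem foldl_fcmStep (l : List (String × List Int)) :
    ∀ a b c : Int, l.foldl fcmStep (a, b, c) =
      (a + (totOf l - unpOf l), b + unpOf l, c + (empOf l - empUnpOf l)) := by
  induction l with
  | nil => intro a b c; simp [totOf, unpOf, empOf, empUnpOf]
  | cons kv t ih =>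
    intro a b c
    by_cases hk : kv.1 = "Unplaced"
    · by_cases hz : kv.2.isEmpty
      · simp [fcmStep, hk, List.isEmpty_iff.mp hz, ih, totOf, unpOf, empOf, empUnpOf]
      · have hz' : kv.2.length ≠ 0 := by
          simpa [List.isEmpty_iff, List.length_eq_zero_iff] using hz
        simp [fcmStep, hk, hz, ih, totOf, unpOf, empOf, empUnpOf]; ring
    · by_cases hz : kv.2.isEmpty
      · simp [fcmStep, hk, List.isEmpty_iff.mp hz, ih, totOf, unpOf, empOf, empUnpOf]; ring
      · have hz' : kv.2.length ≠ 0 := by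
          simpa [List.isEmpty_iff, List.length_eq_zero_iff] using hz
        simp [fcmStep, hk, hz, hz', ih, totOf, unpOf, empOf, empUnpOf]; ring

-- ===== VERDICT (by name: the statement is the Claim_ definition above) =====
theorem fillConfMatrix_spec : Claim_equal_fillConfMatrix := by
  intro dF dRC _
  show fillConfMatrix dF dRC = fillConfMatrix_alt dF dRC
  simp [fillConfMatrix, fillConfMatrix_alt, foldl_fcmStep, totOf, unpOf, empOf, empUnpOf,
    List.filter_append, List.map_append, List.sum_append]
  constructor <;> ring
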